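-- pv_equiv track=rewrite | github.com/totokunda/apex-studio | apps/api/src/converters/base_converter.py | _matches_any_model_prefix
-- ===== SOURCE A (Python) =====
-- def _matches_any_model_prefix(candidate: str, model_key_set: set) -> bool:
--     """
--     Return True if `candidate` matches `model_keys` either exactly OR as a
--     parameter key that lives under a module key in `model_keys`.
--
--     This supports callers that pass module names (e.g. from `named_modules()`)
--     instead of full parameter keys (from `state_dict().keys()`).
--     """
--     if candidate in model_key_set:
--         return True
--     if "." not in candidate:
--         return False
--     parts = candidate.split(".")
--     # Check progressively longer dotted prefixes: "a", "a.b", "a.b.c", ...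
--     prefix = parts[0]
--     if prefix in model_key_set:
--         return True
--     for i in range(1, len(parts)):
--         prefix = f"{prefix}.{parts[i]}"
--         if prefix in model_key_set:
--             return True
--     return False
-- ===== SOURCE B (Python) =====
-- def _matches_any_model_prefix(candidate: str, model_key_set: set) -> bool:
--     # Scan the keys instead of generating candidate's dotted prefixes:
--     # a key matches iff it equals candidate or is a segment-boundary prefix.
--     return any(k == candidate or candidate.startswith(k + ".") for k in model_key_set)
-- ===== Notes on version B (the rewrite author's own statement) =====
-- stated objective: simpler
-- what changed: Instead of splitting the candidate and hashing each progressively longer dotted prefix against the set, B scans the set once and tests each key directly with k == candidate or candidate.startswith(k + '.').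
import Mathlib
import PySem

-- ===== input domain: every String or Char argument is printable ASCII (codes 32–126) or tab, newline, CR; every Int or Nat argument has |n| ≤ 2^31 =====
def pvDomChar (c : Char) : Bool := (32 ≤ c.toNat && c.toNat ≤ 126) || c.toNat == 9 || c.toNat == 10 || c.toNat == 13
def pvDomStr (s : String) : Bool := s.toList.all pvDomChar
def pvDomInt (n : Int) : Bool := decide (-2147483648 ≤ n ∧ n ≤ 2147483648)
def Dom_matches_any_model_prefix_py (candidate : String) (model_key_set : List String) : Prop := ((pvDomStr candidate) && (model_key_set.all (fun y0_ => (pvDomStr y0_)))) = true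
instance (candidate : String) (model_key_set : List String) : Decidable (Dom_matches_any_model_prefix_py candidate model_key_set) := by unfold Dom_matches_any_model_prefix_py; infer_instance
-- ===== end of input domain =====

-- B replaces A's split-candidate-and-hash-each-dotted-prefix scan by a single scan
-- of the set's keys testing `k == candidate or candidate.startswith(k + ".")`; same
-- return value, chosen for simplicity (no speed claim).

-- ===== PORT A =====
-- the `for i in range(1, len(parts))` loop: `pref` is the accumulated dotted prefix
def pvALoop (model_key_set : List String) (pref : String) : List String → Bool
  | [] => false
  | p :: rest =>
      let pref' := pref ++ "." ++ p
      if PySem.Set.contains model_key_set pref' then true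
      else pvALoop model_key_set pref' rest

def matches_any_model_prefix_py (candidate : String) (model_key_set : List String) : Bool :=
  if PySem.Set.contains model_key_set candidate then true
  else if PySem.Str.isIn "." candidate = false then false
  else
    match PySem.Str.split? candidate "." with
    | none => false          -- unreachable: separator "." is nonempty
    | some [] => false       -- unreachable: split never returns an empty list
    | some (p0 :: rest) =>
        if PySem.Set.contains model_key_set p0 then true
        else pvALoop model_key_set p0 rest

-- ===== PORT B =====
def matches_any_model_prefix_py_alt (candidate : String) (model_key_set : List String) : Bool :=
  model_key_set.any (fun k => k == candidate || PySem.Str.startswith candidate (k ++ "."))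

-- ===== PRECONDITION & SPEC =====
def Spec_matches_any_model_prefix_py (candidate : String) (model_key_set : List String) (out : Bool) : Prop := out = matches_any_model_prefix_py_alt candidate model_key_set
instance (candidate : String) (model_key_set : List String) (out : Bool) : Decidable (Spec_matches_any_model_prefix_py candidate model_key_set out) := by unfold Spec_matches_any_model_prefix_py; infer_instance

-- ===== CLAIM (what is proved, stated in full; the proofs are below) =====
def Claim_equal_matches_any_model_prefix_py : Prop := ∀ (candidate : String) (model_key_set : List String), Dom_matches_any_model_prefix_py candidate model_key_set → Spec_matches_any_model_prefix_py candidate model_key_set (matches_any_model_prefix_py candidate model_key_set)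

-- ===== LEMMAS AND PROOFS =====

-- char-level mirror of the dotted prefixes A's loop walks through
def pvDP (pref : List Char) : List (List Char) → List (List Char)
  | [] => []
  | p :: r => (pref ++ '.' :: p) :: pvDP (pref ++ '.' :: p) r

theorem pvDP_append (r : List (List Char)) (x pref : List Char) :
    pvDP (x ++ pref) r = (pvDP pref r).map (x ++ ·) := by
  induction r generalizing pref with
  | nil => rfl
  | cons p r ih =>
      simp only [pvDP, List.map_cons]
      rw [List.append_assoc, ih]

theorem pvGo_nil (sep : List Char) (fuel : Nat) (cur : List Char) (acc : List (List Char)) :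
    PySem.Chars.splitOn.go sep fuel [] cur acc = (cur.reverse :: acc).reverse := by
  cases fuel <;> simp [PySem.Chars.splitOn.go]

theorem pvGo_dot (fuel : Nat) (t cur : List Char) (acc : List (List Char)) :
    PySem.Chars.splitOn.go ['.'] (fuel+1) ('.'::t) cur acc
      = PySem.Chars.splitOn.go ['.'] fuel t [] (cur.reverse :: acc) := by
  simp [PySem.Chars.splitOn.go, List.isPrefixOf]

theorem pvGo_ne (a : Char) (h : a ≠ '.') (fuel : Nat) (t cur : List Char) (acc : List (List Char)) :
    PySem.Chars.splitOn.go ['.'] (fuel+1) (a::t) cur acc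
      = PySem.Chars.splitOn.go ['.'] fuel t (a::cur) acc := by
  simp [PySem.Chars.splitOn.go, List.isPrefixOf, Ne.symm h]

-- structural recursion computing splitOn on separator "."
def pvSplit : List Char → List (List Char)
  | [] => [[]]
  | a :: t => if a = '.' then [] :: pvSplit t
              else match pvSplit t with
                   | [] => [[a]]
                   | p :: ps => (a :: p) :: ps

theorem pvSplit_ne_nil (t : List Char) : pvSplit t ≠ [] := by
  cases t with
  | nil => simp [pvSplit]
  | cons a t =>
      simp only [pvSplit]
      by_cases ha : a = '.'
      · simp [ha]
      · rcases hsp : pvSplit t with _ | ⟨p, ps⟩ <;> simp [ha]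

-- go with general fuel/cur/acc, expressed through pvSplit of the remaining input
theorem pvGo_spec (fuel : Nat) : ∀ (l cur : List Char) (acc : List (List Char)), l.length < fuel →
    PySem.Chars.splitOn.go ['.'] fuel l cur acc
      = acc.reverse ++ (match pvSplit l with
          | [] => [cur.reverse]
          | p :: ps => (cur.reverse ++ p) :: ps) := by
  induction fuel with
  | zero => intro l cur acc h; exact absurd h (Nat.not_lt_zero _)
  | succ fuel ih =>
      intro l cur acc h
      match l with
      | [] => simp [pvGo_nil, pvSplit]
      | a :: t =>
          have ht : t.length < fuel := by simpa using Nat.lt_of_succ_lt_succ h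
          by_cases ha : a = '.'
          · subst ha
            rw [pvGo_dot, ih t [] _ ht]
            simp only [pvSplit, if_true]
            rcases hsp : pvSplit t with _ | ⟨p, ps⟩
            · exact absurd hsp (pvSplit_ne_nil t)
            · simp
          · rw [pvGo_ne a ha, ih t _ _ ht]
            simp only [pvSplit, if_neg ha]
            rcases hsp : pvSplit t with _ | ⟨p, ps⟩
            · exact absurd hsp (pvSplit_ne_nil t)
            · simp

theorem pvSplitOn_eq (c : List Char) : PySem.Chars.splitOn c ['.'] = pvSplit c := by
  show PySem.Chars.splitOn.go ['.'] (c.length + 1) c [] [] = _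
  rw [pvGo_spec (c.length + 1) c [] [] (Nat.lt_succ_self _)]
  rcases hsp : pvSplit c with _ | ⟨p, ps⟩
  · exact absurd hsp (pvSplit_ne_nil c)
  · simp

-- CORE: the dotted prefixes A generates are exactly c itself plus the k with k ++ "." a prefix of c
theorem pvCore (c : List Char) : ∃ p0 ps, pvSplit c = p0 :: ps ∧
    ∀ k : List Char, (k = p0 ∨ k ∈ pvDP p0 ps) ↔ (k = c ∨ (k ++ ['.']) <+: c) := by
  induction c with
  | nil =>
      refine ⟨[], [], rfl, fun k => ?_⟩
      constructor
      · rintro (rfl | h)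
        · exact Or.inl rfl
        · simp [pvDP] at h
      · rintro (rfl | h)
        · exact Or.inl rfl
        · exact absurd (List.IsPrefix.length_le h) (by simp)
  | cons a t ih =>
      obtain ⟨q0, qs, hsp, hiff⟩ := ih
      by_cases ha : a = '.'
      · subst ha
        refine ⟨[], q0 :: qs, by simp [pvSplit, hsp], fun k => ?_⟩
        have h' : pvDP ('.' :: q0) qs = (pvDP q0 qs).map ('.' :: ·) := by
          simpa using pvDP_append qs ['.'] q0
        have hdp : pvDP ([] : List Char) (q0 :: qs)
            = ('.' :: q0) :: (pvDP q0 qs).map ('.' :: ·) := by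
          simp only [pvDP, List.nil_append]; rw [h']
        rw [hdp]
        rcases k with _ | ⟨b, k'⟩
        · simp
        · constructor
          · rintro (h | h)
            · simp at h
            · rcases List.mem_cons.mp h with h | h
              · rcases (hiff q0).mp (Or.inl rfl) with h2 | h2
                · exact Or.inl (by rw [h, h2])
                · exact Or.inr (by rw [h, List.cons_append, List.cons_prefix_cons]; exact ⟨rfl, h2⟩)
              · obtain ⟨q, hq, heq⟩ := List.mem_map.mp h
                rcases (hiff q).mp (Or.inr hq) with h2 | h2
                · exact Or.inl (by rw [← heq, h2])
                · exact Or.inr (by rw [← heq, List.cons_append, List.cons_prefix_cons]; exact ⟨rfl, h2⟩)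
          · rintro (h | h)
            · rcases (hiff t).mpr (Or.inl rfl) with h2 | h2
              · exact Or.inr (List.mem_cons.mpr (Or.inl (by rw [h, h2])))
              · exact Or.inr (List.mem_cons.mpr (Or.inr (List.mem_map.mpr ⟨t, h2, by rw [h]⟩)))
            · rw [List.cons_append, List.cons_prefix_cons] at h
              rcases h with ⟨rfl, hpre⟩
              rcases (hiff k').mpr (Or.inr hpre) with h2 | h2
              · exact Or.inr (List.mem_cons.mpr (Or.inl (by rw [h2])))
              · exact Or.inr (List.mem_cons.mpr (Or.inr (List.mem_map.mpr ⟨k', h2, rfl⟩)))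
      · refine ⟨a :: q0, qs, by simp [pvSplit, ha, hsp], fun k => ?_⟩
        have hdp : pvDP (a :: q0) qs = (pvDP q0 qs).map (a :: ·) := by
          simpa using pvDP_append qs [a] q0
        rw [hdp]
        rcases k with _ | ⟨b, k'⟩
        · constructor
          · rintro (h | h)
            · simp at h
            · simp at h
          · rintro (h | h)
            · simp at h
            · rw [List.nil_append] at h
              rcases List.cons_prefix_cons.mp h with ⟨h1, _⟩
              exact absurd h1.symm ha
        · constructor
          · rintro (h | h)
            · rcases (hiff q0).mp (Or.inl rfl) with h2 | h2
              · exact Or.inl (by rw [h, h2])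
              · exact Or.inr (by rw [h, List.cons_append, List.cons_prefix_cons]; exact ⟨rfl, h2⟩)
            · obtain ⟨q, hq, heq⟩ := List.mem_map.mp h
              rcases (hiff q).mp (Or.inr hq) with h2 | h2
              · exact Or.inl (by rw [← heq, h2])
              · exact Or.inr (by rw [← heq, List.cons_append, List.cons_prefix_cons]; exact ⟨rfl, h2⟩)
          · rintro (h | h)
            · rcases (hiff t).mpr (Or.inl rfl) with h2 | h2
              · exact Or.inl (by rw [h, h2])
              · exact Or.inr (List.mem_map.mpr ⟨t, h2, by rw [h]⟩)
            · rw [List.cons_append, List.cons_prefix_cons] at h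
              rcases h with ⟨rfl, hpre⟩
              rcases (hiff k').mpr (Or.inr hpre) with h2 | h2
              · exact Or.inl (by rw [h2])
              · exact Or.inr (List.mem_map.mpr ⟨k', h2, rfl⟩)

-- A's loop hits iff some key's char list is one of the accumulated dotted prefixes
theorem pvALoop_iff (S : List String) : ∀ (rest : List String) (pref : String),
    pvALoop S pref rest = true
      ↔ ∃ k ∈ S, k.toList ∈ pvDP pref.toList (rest.map String.toList) := by
  intro rest
  induction rest with
  | nil => intro pref; simp [pvALoop, pvDP]
  | cons p r ih =>
      intro pref
      simp only [pvALoop, List.map_cons, pvDP]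
      have htl : (pref ++ "." ++ p).toList = pref.toList ++ '.' :: p.toList := by
        simp [String.toList_append]
      by_cases hc : PySem.Set.contains S (pref ++ "." ++ p) = true
      · rw [if_pos hc]
        obtain hk := (PySem.Set.contains_iff S _).mp hc
        simp only [true_iff]
        exact ⟨_, hk, by rw [htl]; exact List.mem_cons_self ..⟩
      · rw [if_neg hc]
        rw [ih (pref ++ "." ++ p)]
        rw [htl]
        constructor
        · rintro ⟨k, hk, hmem⟩
          exact ⟨k, hk, List.mem_cons_of_mem _ hmem⟩
        · rintro ⟨k, hk, hmem⟩
          rcases List.mem_cons.mp hmem with h | h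
          · exfalso
            apply hc
            rw [PySem.Set.contains_iff]
            have : k = pref ++ "." ++ p := String.toList_inj.mp (by rw [h, htl])
            rwa [← this]
          · exact ⟨k, hk, h⟩

theorem pvA_iff (candidate : String) (S : List String) :
    matches_any_model_prefix_py candidate S = true
      ↔ ∃ k ∈ S, (k = candidate ∨ (k.toList ++ ['.']) <+: candidate.toList) := by
  unfold matches_any_model_prefix_py
  obtain ⟨p0, ps, hsp, hiff⟩ := pvCore candidate.toList
  by_cases hc : PySem.Set.contains S candidate = true
  · rw [if_pos hc]
    simp only [true_iff]
    exact ⟨candidate, (PySem.Set.contains_iff S _).mp hc, Or.inl rfl⟩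
  · rw [if_neg hc]
    by_cases hdot : PySem.Str.isIn "." candidate = false
    · rw [if_pos hdot]
      simp only [Bool.false_eq_true, false_iff]
      rintro ⟨k, hk, h | h⟩
      · exact hc (by rw [h] at hk; exact (PySem.Set.contains_iff S _).mpr hk)
      · have : (".".toList) <:+: candidate.toList :=
          List.IsInfix.trans ⟨k.toList, [], by simp⟩ h.isInfix
        rw [← PySem.Str.isIn_iff_infix] at this
        rw [hdot] at this
        exact Bool.false_ne_true this
    · rw [if_neg hdot]
      have hsplit : PySem.Str.split? candidate "."
          = some ((p0 :: ps).map String.ofList) := by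
        simp [PySem.Str.split?, PySem.Chars.split?,
              show (".":String).toList = ['.'] from rfl, pvSplitOn_eq, hsp]
      rw [hsplit]
      simp only [List.map_cons]
      have hrest : ((ps.map String.ofList).map String.toList) = ps := by
        simp [List.map_map, Function.comp_def]
      by_cases hp0 : PySem.Set.contains S (String.ofList p0) = true
      · rw [if_pos hp0]
        simp only [true_iff]
        refine ⟨String.ofList p0, (PySem.Set.contains_iff S _).mp hp0, ?_⟩
        rcases (hiff p0).mp (Or.inl rfl) with h | h
        · exact Or.inl (String.toList_inj.mp (by simp [h]))
        · exact Or.inr (by simpa using h)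
      · rw [if_neg hp0]
        rw [pvALoop_iff S (ps.map String.ofList) (String.ofList p0)]
        rw [hrest, String.toList_ofList]
        constructor
        · rintro ⟨k, hk, hmem⟩
          rcases (hiff k.toList).mp (Or.inr hmem) with h | h
          · exact ⟨k, hk, Or.inl (String.toList_inj.mp h)⟩
          · exact ⟨k, hk, Or.inr h⟩
        · rintro ⟨k, hk, h | h⟩
          · subst h
            rcases (hiff k.toList).mpr (Or.inl rfl) with h' | h'
            · exfalso
              apply hp0
              rw [PySem.Set.contains_iff]
              have : String.ofList p0 = k := String.toList_inj.mp (by simp [h'])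
              rwa [this]
            · exact ⟨k, hk, h'⟩
          · rcases (hiff k.toList).mpr (Or.inr h) with h' | h'
            · exfalso
              apply hp0
              rw [PySem.Set.contains_iff]
              have : String.ofList p0 = k := String.toList_inj.mp (by simp [h'])
              rwa [this]
            · exact ⟨k, hk, h'⟩

theorem pvB_iff (candidate : String) (S : List String) :
    matches_any_model_prefix_py_alt candidate S = true
      ↔ ∃ k ∈ S, (k = candidate ∨ (k.toList ++ ['.']) <+: candidate.toList) := by
  unfold matches_any_model_prefix_py_alt
  rw [List.any_eq_true]
  apply exists_congr; intro k
  apply and_congr_right; intro _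
  rw [Bool.or_eq_true, beq_iff_eq]
  apply or_congr Iff.rfl
  rw [PySem.Str.startswith_eq, PySem.Chars.startswith_iff]
  rw [String.toList_append]
  rfl

-- ===== VERDICT (by name: the statement is the Claim_ definition above) =====
theorem matches_any_model_prefix_py_spec : Claim_equal_matches_any_model_prefix_py := by
  intro candidate S _
  unfold Spec_matches_any_model_prefix_py
  rw [Bool.eq_iff_iff, pvA_iff, pvB_iff]
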